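-- pv_equiv track=rewrite | github.com/sqmq13/pm-data-infra | pm_arb/book.py | normalize_asks
-- ===== SOURCE A (Python) =====
-- def normalize_asks(asks: list[tuple[int, int]], top_k: int) -> list[tuple[int, int]]:
--     levels: dict[int, int] = {}
--     for price_micro, size_units in asks:
--         if price_micro <= 0 or size_units <= 0:
--             continue
--         levels[price_micro] = levels.get(price_micro, 0) + size_units
--     merged = sorted(levels.items(), key=lambda x: x[0])
--     if top_k > 0:
--         merged = merged[:top_k]
--     return merged
-- ===== SOURCE B (Python) =====
-- def normalize_asks(asks: list[tuple[int, int]], top_k: int) -> list[tuple[int, int]]: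
--     valid = sorted(((p, s) for p, s in asks if p > 0 and s > 0), key=lambda x: x[0])
--     result = []
--     if valid:
--         cur_price, cur_size = valid[0]
--         for p, s in valid[1:]:
--             if p == cur_price:
--                 cur_size += s
--             else:
--                 result.append((cur_price, cur_size))
--                 cur_price, cur_size = p, s
--         result.append((cur_price, cur_size))
--     if top_k > 0:
--         result = result[:top_k]
--     return result
-- ===== Notes on version B (the rewrite author's own statement) =====
-- stated objective: alternative
-- what changed: Replaces the dict accumulation followed by a key-sort of the dict items with a filter-then-sort of the raw pairs and a single linear scan that merges adjacent equal-price runs, keeping no dict at all.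
import Mathlib
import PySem

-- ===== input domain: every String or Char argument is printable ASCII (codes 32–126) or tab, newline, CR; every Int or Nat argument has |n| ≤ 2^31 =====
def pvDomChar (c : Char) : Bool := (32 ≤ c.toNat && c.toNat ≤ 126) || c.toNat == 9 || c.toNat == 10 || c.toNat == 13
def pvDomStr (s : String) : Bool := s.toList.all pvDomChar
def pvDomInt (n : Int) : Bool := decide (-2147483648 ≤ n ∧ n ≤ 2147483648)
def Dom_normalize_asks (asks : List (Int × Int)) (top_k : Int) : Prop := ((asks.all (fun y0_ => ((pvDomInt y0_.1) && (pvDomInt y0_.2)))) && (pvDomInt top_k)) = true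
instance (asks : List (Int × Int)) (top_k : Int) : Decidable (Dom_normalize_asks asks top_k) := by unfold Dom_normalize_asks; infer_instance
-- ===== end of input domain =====

-- B replaces the dict accumulation + key-sort of items with filter-then-sort of the raw
-- pairs and one linear scan merging adjacent equal-price runs (alternative decomposition,
-- similar cost); return values proved equal on all inputs.

-- ===== PORT A =====
def normalize_asks (asks : List (Int × Int)) (top_k : Int) : List (Int × Int) :=
  let levels : PySem.Dict Int Int :=
    asks.foldl (fun d ps =>
      if ps.1 ≤ 0 ∨ ps.2 ≤ 0 then d
      else d.insert ps.1 (d.getD ps.1 0 + ps.2)) PySem.Dict.empty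
  let merged := PySem.List.sorted levels.items (fun x => x.1)
  if top_k > 0 then PySem.List.slice merged none (some top_k) else merged

-- ===== PORT B =====
-- the scan loop of Source B: (cp, cs) is the current run, emitted when the price changes
-- and flushed at the end
def groupRun : Int → Int → List (Int × Int) → List (Int × Int)
  | cp, cs, [] => [(cp, cs)]
  | cp, cs, (p, s) :: t =>
      if p = cp then groupRun cp (cs + s) t
      else (cp, cs) :: groupRun p s t

def normalize_asks_alt (asks : List (Int × Int)) (top_k : Int) : List (Int × Int) :=
  let valid := PySem.List.sorted
    (asks.filter (fun ps => decide (0 < ps.1) && decide (0 < ps.2))) (fun x => x.1)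
  let result := match valid with
    | [] => []
    | (p, s) :: t => groupRun p s t
  if top_k > 0 then PySem.List.slice result none (some top_k) else result

-- ===== PRECONDITION & SPEC =====
def Spec_normalize_asks (asks : List (Int × Int)) (top_k : Int) (out : List (Int × Int)) : Prop := out = normalize_asks_alt asks top_k
instance (asks : List (Int × Int)) (top_k : Int) (out : List (Int × Int)) : Decidable (Spec_normalize_asks asks top_k out) := by unfold Spec_normalize_asks; infer_instance

-- ===== CLAIM (what is proved, stated in full; the proofs are below) =====
def Claim_equal_normalize_asks : Prop := ∀ (asks : List (Int × Int)) (top_k : Int), Dom_normalize_asks asks top_k → Spec_normalize_asks asks top_k (normalize_asks asks top_k)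

-- ===== LEMMAS AND PROOFS =====

-- total size at a given price
def sumAt (k : Int) (l : List (Int × Int)) : Int :=
  ((l.filter (fun ps => decide (ps.1 = k))).map (·.2)).sum

theorem sumAt_nil (k : Int) : sumAt k [] = 0 := rfl

theorem sumAt_cons (k a b : Int) (t : List (Int × Int)) :
    sumAt k ((a, b) :: t) = (if a = k then b else 0) + sumAt k t := by
  simp only [sumAt, List.filter_cons]
  split_ifs with h <;> simp_all

theorem sumAt_perm (k : Int) {l₁ l₂ : List (Int × Int)} (h : l₁.Perm l₂) :
    sumAt k l₁ = sumAt k l₂ := by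
  exact List.Perm.sum_eq (List.Perm.map _ (List.Perm.filter _ h))

-- A's guarded fold is the unguarded fold over the filtered list
theorem foldA_eq_foldF (asks : List (Int × Int)) (d : PySem.Dict Int Int) :
    asks.foldl (fun d ps =>
      if ps.1 ≤ 0 ∨ ps.2 ≤ 0 then d
      else d.insert ps.1 (d.getD ps.1 0 + ps.2)) d
    = (asks.filter (fun ps => decide (0 < ps.1) && decide (0 < ps.2))).foldl
        (fun d ps => d.insert ps.1 (d.getD ps.1 0 + ps.2)) d := by
  induction asks generalizing d with
  | nil => rfl
  | cons ps t ih =>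
      simp only [List.foldl_cons, List.filter_cons]
      by_cases h : ps.1 ≤ 0 ∨ ps.2 ≤ 0
      · have hb : (decide (0 < ps.1) && decide (0 < ps.2)) = false := by
          rcases h with h | h <;> simp [not_lt.mpr h]
        rw [if_pos h, hb]
        simpa using ih d
      · have h1 : 0 < ps.1 := by omega
        have h2 : 0 < ps.2 := by omega
        have hb : (decide (0 < ps.1) && decide (0 < ps.2)) = true := by simp [h1, h2]
        rw [if_neg h, hb]
        simpa using ih _

theorem getD_foldF (l : List (Int × Int)) (d : PySem.Dict Int Int) (k : Int) :
    (l.foldl (fun d ps => d.insert ps.1 (d.getD ps.1 0 + ps.2)) d).getD k 0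
    = d.getD k 0 + sumAt k l := by
  induction l generalizing d with
  | nil => simp [sumAt_nil]
  | cons ps t ih =>
      obtain ⟨a, b⟩ := ps
      rw [List.foldl_cons, ih, sumAt_cons, PySem.Dict.getD_insert]
      by_cases h : k = a
      · subst h; rw [if_pos rfl, if_pos rfl]; ring
      · rw [if_neg h, if_neg (fun hh => h hh.symm)]; ring

theorem keys_foldF (l : List (Int × Int)) :
    (l.foldl (fun d ps => d.insert ps.1 (d.getD ps.1 0 + ps.2))
      (PySem.Dict.empty : PySem.Dict Int Int)).keys
    = PySem.Set.ofList (l.map Prod.fst) := by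
  have := PySem.Dict.keys_foldl_insert_key l Prod.fst
    (fun d ps => d.getD ps.1 0 + ps.2) (PySem.Dict.empty : PySem.Dict Int Int)
  simpa [PySem.Dict.keys_empty] using this

theorem nodup_keys_foldF (l : List (Int × Int)) :
    (l.foldl (fun d ps => d.insert ps.1 (d.getD ps.1 0 + ps.2))
      (PySem.Dict.empty : PySem.Dict Int Int)).keys.Nodup := by
  exact PySem.Dict.nodup_keys_foldl_insert_key l Prod.fst _ _ (by simp [PySem.Dict.keys_empty])

-- membership characterisation of A's dict items
theorem mem_items_foldF (l : List (Int × Int)) (k v : Int) :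
    (k, v) ∈ (l.foldl (fun d ps => d.insert ps.1 (d.getD ps.1 0 + ps.2))
      (PySem.Dict.empty : PySem.Dict Int Int)).items
    ↔ k ∈ l.map Prod.fst ∧ v = sumAt k l := by
  rw [PySem.Dict.items_eq_map_keys _ (nodup_keys_foldF l) 0]
  constructor
  · rintro h
    rcases List.mem_map.mp h with ⟨k', hk', hkv⟩
    obtain ⟨rfl, rfl⟩ := Prod.mk.injEq .. ▸ hkv
    rw [keys_foldF] at hk'
    refine ⟨(PySem.Set.mem_ofList _ _).mp hk', ?_⟩
    simpa using getD_foldF l PySem.Dict.empty k'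
  · rintro ⟨hk, rfl⟩
    refine List.mem_map.mpr ⟨k, ?_, ?_⟩
    · rw [keys_foldF]; exact (PySem.Set.mem_ofList _ _).mpr hk
    · have := getD_foldF l PySem.Dict.empty k
      simp at this
      simp [this]

theorem groupRun_cons_eq (p q s : Int) (t : List (Int × Int)) :
    groupRun p q ((p, s) :: t) = groupRun p (q + s) t := by
  simp [groupRun]

theorem groupRun_cons_ne (p q a s : Int) (t : List (Int × Int)) (h : a ≠ p) :
    groupRun p q ((a, s) :: t) = (p, q) :: groupRun a s t := by
  simp [groupRun, h]

theorem sumAt_head_ne (k p q : Int) (l : List (Int × Int)) (h : p ≠ k) :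
    sumAt k ((p, q) :: l) = sumAt k l := by
  rw [sumAt_cons, if_neg h]
  ring

theorem sumAt_of_not_mem (k : Int) (t : List (Int × Int)) (h : k ∉ t.map Prod.fst) :
    sumAt k t = 0 := by
  have : t.filter (fun ps => decide (ps.1 = k)) = [] := by
    rw [List.filter_eq_nil_iff]
    intro ps hps
    simp only [decide_eq_true_eq]
    intro hk
    exact h (List.mem_map.mpr ⟨ps, hps, hk⟩)
  simp [sumAt, this]

-- groupRun: membership characterisation on a price-sorted run
theorem mem_groupRun (t : List (Int × Int)) (p q k v : Int)
    (hs : (p :: t.map Prod.fst).Pairwise (· ≤ ·)) :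
    (k, v) ∈ groupRun p q t ↔ (k ∈ p :: t.map Prod.fst) ∧ v = sumAt k ((p, q) :: t) := by
  induction t generalizing p q with
  | nil =>
      simp only [groupRun, Prod.mk.injEq, List.map_nil,
        List.mem_cons, List.not_mem_nil, or_false, sumAt_cons, sumAt_nil]
      constructor
      · rintro ⟨rfl, rfl⟩; simp
      · rintro ⟨rfl, h⟩
        rw [if_pos rfl] at h
        exact ⟨rfl, by omega⟩
  | cons ps t ih =>
      obtain ⟨a, b⟩ := ps
      by_cases hap : a = p
      · subst hap
        have hs' : (a :: t.map Prod.fst).Pairwise (· ≤ ·) := by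
          rcases List.pairwise_cons.mp hs with ⟨_, h2⟩
          exact h2
        rw [groupRun_cons_eq, ih a (q + b) hs']
        have hsum : sumAt k ((a, q + b) :: t) = sumAt k ((a, q) :: (a, b) :: t) := by
          rw [sumAt_cons, sumAt_cons, sumAt_cons]
          split_ifs <;> ring
        constructor
        · rintro ⟨hk, rfl⟩
          exact ⟨by simpa using hk, hsum⟩
        · rintro ⟨hk, rfl⟩
          exact ⟨by simpa using hk, hsum.symm⟩
      · have hpa : p ≤ a := (List.pairwise_cons.mp hs).1 _ (by simp)
        have hlt : p < a := lt_of_le_of_ne hpa (fun h => hap h.symm)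
        have hs' : (a :: t.map Prod.fst).Pairwise (· ≤ ·) := by
          have h2 := (List.pairwise_cons.mp hs).2
          simpa using h2
        have hplt : ∀ x ∈ a :: t.map Prod.fst, p < x := by
          intro x hx
          rcases List.mem_cons.mp hx with rfl | hx
          · exact hlt
          · exact lt_of_lt_of_le hlt ((List.pairwise_cons.mp hs').1 _ hx)
        have hpnot : p ∉ a :: t.map Prod.fst := fun hmem => absurd (hplt _ hmem) (lt_irrefl p)
        rw [groupRun_cons_ne _ _ _ _ _ hap, List.mem_cons, ih a b hs']
        constructor
        · rintro (h | ⟨hk, rfl⟩)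
          · obtain ⟨rfl, rfl⟩ := Prod.mk.injEq .. ▸ h
            refine ⟨List.mem_cons_self, ?_⟩
            rw [sumAt_cons, if_pos rfl, sumAt_head_ne _ _ _ _ hap,
              sumAt_of_not_mem k t (fun hmem => hpnot (List.mem_cons_of_mem _ hmem))]
            ring
          · have hkp : p < k := hplt _ (by simpa using hk)
            refine ⟨List.mem_cons_of_mem _ (by simpa using hk), ?_⟩
            rw [sumAt_head_ne _ _ _ _ (by omega : p ≠ k)]
        · rintro ⟨hk, rfl⟩
          rcases List.mem_cons.mp hk with rfl | hk
          · left
            rw [sumAt_cons, if_pos rfl, sumAt_head_ne _ _ _ _ hap,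
              sumAt_of_not_mem k t (fun hmem => hpnot (List.mem_cons_of_mem _ hmem))]
            simp
          · right
            have hkp : p < k := hplt _ (by simpa using hk)
            refine ⟨by simpa using hk, ?_⟩
            rw [sumAt_head_ne _ _ _ _ (by omega : p ≠ k)]

-- groupRun keys are strictly increasing (with a lower bound)
theorem groupRun_keys_lt (t : List (Int × Int)) (p q : Int)
    (hs : (p :: t.map Prod.fst).Pairwise (· ≤ ·)) :
    ((groupRun p q t).map Prod.fst).Pairwise (· < ·)
    ∧ ∀ k ∈ (groupRun p q t).map Prod.fst, p ≤ k := by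
  induction t generalizing p q with
  | nil => simp [groupRun]
  | cons ps t ih =>
      obtain ⟨a, b⟩ := ps
      by_cases hap : a = p
      · subst hap
        have hs' : (a :: t.map Prod.fst).Pairwise (· ≤ ·) := by
          simpa using (List.pairwise_cons.mp hs).2
        rw [groupRun_cons_eq]
        exact ih a (q + b) hs'
      · have hpa : p ≤ a := (List.pairwise_cons.mp hs).1 _ (by simp)
        have hlt : p < a := lt_of_le_of_ne hpa (fun h => hap h.symm)
        have hs' : (a :: t.map Prod.fst).Pairwise (· ≤ ·) := by
          simpa using (List.pairwise_cons.mp hs).2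
        obtain ⟨ih1, ih2⟩ := ih a b hs'
        rw [groupRun_cons_ne _ _ _ _ _ hap]
        constructor
        · rw [List.map_cons]
          exact List.pairwise_cons.mpr ⟨fun k hk => lt_of_lt_of_le hlt (ih2 _ hk), ih1⟩
        · intro k hk
          rcases List.mem_cons.mp (by simpa using hk : k ∈ p :: (groupRun a b t).map Prod.fst) with rfl | hk
          · exact le_refl _
          · exact le_of_lt (lt_of_lt_of_le hlt (ih2 _ hk))

theorem main_merged (asks : List (Int × Int)) :
    PySem.List.sorted
      (asks.foldl (fun d ps =>
        if ps.1 ≤ 0 ∨ ps.2 ≤ 0 then d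
        else d.insert ps.1 (d.getD ps.1 0 + ps.2)) PySem.Dict.empty).items
      (fun x => x.1)
    = (match PySem.List.sorted
        (asks.filter (fun ps => decide (0 < ps.1) && decide (0 < ps.2))) (fun x => x.1) with
      | [] => []
      | (p, s) :: t => groupRun p s t) := by
  rw [foldA_eq_foldF]
  generalize hg : asks.filter (fun ps => decide (0 < ps.1) && decide (0 < ps.2)) = g
  have hperm : (PySem.List.sorted g (fun x => x.1)).Perm g := PySem.List.sorted_perm g _ _
  cases hs : PySem.List.sorted g (fun x => x.1) with
  | nil =>
      have hgnil : g = [] := (hs ▸ hperm).symm.eq_nil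
      subst hgnil
      rfl
  | cons hd tl =>
      obtain ⟨p, q⟩ := hd
      rw [hs] at hperm
      have hpair : (((p, q) :: tl).map Prod.fst).Pairwise (· ≤ ·) := by
        rw [List.pairwise_map]
        have := PySem.List.sorted_pairwise g (fun x => x.1)
        rw [hs] at this
        exact this
      have hpair' : (p :: tl.map Prod.fst).Pairwise (· ≤ ·) := by simpa using hpair
      obtain ⟨hlt, _⟩ := groupRun_keys_lt tl p q hpair'
      apply PySem.List.sorted_eq_of_perm_of_pairwise_lt
      · -- groupRun p q tl is a permutation of the dict's items
        have hnd1 : ((groupRun p q tl).map Prod.fst).Nodup :=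
          List.Pairwise.imp ne_of_lt hlt
        have hnd2 : (g.foldl (fun d ps => d.insert ps.1 (d.getD ps.1 0 + ps.2))
            (PySem.Dict.empty : PySem.Dict Int Int)).items.map Prod.fst
            = (g.foldl (fun d ps => d.insert ps.1 (d.getD ps.1 0 + ps.2))
            (PySem.Dict.empty : PySem.Dict Int Int)).keys := rfl
      
        rw [List.perm_ext_iff_of_nodup (List.Nodup.of_map _ hnd1)
          (List.Nodup.of_map _ (hnd2 ▸ nodup_keys_foldF g))]
        rintro ⟨k, v⟩
        rw [mem_groupRun tl p q k v hpair', mem_items_foldF g k v]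
        have hmem : k ∈ p :: tl.map Prod.fst ↔ k ∈ g.map Prod.fst := by
          constructor
          · intro h
            exact (List.Perm.mem_iff (hperm.map Prod.fst)).mp (by simpa using h)
          · intro h
            simpa using (List.Perm.mem_iff (hperm.map Prod.fst)).mpr h
        have hsum : sumAt k ((p, q) :: tl) = sumAt k g := sumAt_perm k hperm
        rw [hmem, hsum]
      · rw [← List.pairwise_map (f := Prod.fst)]
        exact hlt

-- ===== VERDICT (by name: the statement is the Claim_ definition above) =====
theorem normalize_asks_spec : Claim_equal_normalize_asks := by
  intro asks top_k _
  unfold Spec_normalize_asks normalize_asks normalize_asks_alt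
  simp only []
  rw [main_merged asks]
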